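-- pv_equiv track=rewrite | github.com/ParisaRhmati/Karyar-codes | desition.py | build_string
-- ===== SOURCE A (Python) =====
-- def flip_bit(bit):
--     if bit == "0":
--         return "1"
--     else:
--         return "0"
--
-- def build_string(n):
--     string = "1"  # رشته اولیه
--     for _ in range(n - 1):
--         reversed_string = string[::-1]  # معکوس کردن رشته فعلی
--         complemented_string = "".join(
--             flip_bit(bit) for bit in reversed_string)  # تبدیل هر بیت به عکس آن
--         string += complemented_string  # اضافه کردن رشته تبدیل شده به انتهای رشته فعلی
--     return string
-- ===== SOURCE B (Python) =====
-- def build_string(n):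
--     if n < 2:
--         return "1"
--     return "10" * (2 ** (n - 2))
-- ===== Notes on version B (the rewrite author's own statement) =====
-- stated objective: simpler
-- what changed: Replaced the iterative reverse-and-complement doubling loop with a closed form: reverse-then-complement fixes '10', so the result is just '10' repeated 2^(n-2) times (and '1' for n<2).
import Mathlib
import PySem

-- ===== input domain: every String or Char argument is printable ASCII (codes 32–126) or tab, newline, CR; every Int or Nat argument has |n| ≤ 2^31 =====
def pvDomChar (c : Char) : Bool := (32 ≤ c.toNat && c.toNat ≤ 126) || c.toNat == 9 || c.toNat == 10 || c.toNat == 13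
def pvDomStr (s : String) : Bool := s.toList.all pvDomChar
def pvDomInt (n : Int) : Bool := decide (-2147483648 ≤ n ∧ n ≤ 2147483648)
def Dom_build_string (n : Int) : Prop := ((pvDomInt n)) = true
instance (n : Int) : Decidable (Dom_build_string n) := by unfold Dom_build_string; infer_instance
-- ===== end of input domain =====

-- B replaces A's reverse-and-complement doubling loop by the closed form "10" * 2^(n-2) (and "1" for n < 2): simpler, no passes over the string.

-- ===== PORT A =====
-- helper flip_bit, on the List Char representation of the one-character strings it receives
def flip_bit (bit : List Char) : List Char := if bit = ['0'] then ['1'] else ['0']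

def build_string (n : Int) : String :=
  String.ofList <|
    (PySem.List.pyRange 0 (n - 1) 1).foldl
      (fun string _ =>
        let reversed_string := string.reverse  -- string[::-1]; exact by PySem.List.slice?_none_none_neg_one
        let complemented_string := (reversed_string.map (fun bit => flip_bit [bit])).flatten  -- "".join(flip_bit(bit) for bit in ...)
        string ++ complemented_string)
      ['1']

-- ===== PORT B =====
-- "10" * k  (Python string repetition)
def pyStrMulChars (s : List Char) : Nat → List Char
  | 0 => []
  | k + 1 => s ++ pyStrMulChars s k

def build_string_alt (n : Int) : String :=
  if n < 2 then "1" else String.ofList (pyStrMulChars ['1', '0'] (2 ^ (n - 2).toNat))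

-- ===== PRECONDITION & SPEC =====
def Spec_build_string (n : Int) (out : String) : Prop := out = build_string_alt n
instance (n : Int) (out : String) : Decidable (Spec_build_string n out) := by unfold Spec_build_string; infer_instance

-- ===== CLAIM (what is proved, stated in full; the proofs are below) =====
def Claim_equal_build_string : Prop := ∀ (n : Int), Dom_build_string n → Spec_build_string n (build_string n)

-- ===== LEMMAS AND PROOFS =====

-- A's loop body, named for the proofs
def pvStep (s : List Char) : List Char :=
  s ++ (s.reverse.map (fun bit => flip_bit [bit])).flatten

theorem pv_foldl_const_step {α : Type} (l : List α) (init : List Char) :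
    l.foldl (fun s (_ : α) => pvStep s) init = pvStep^[l.length] init := by
  induction l generalizing init with
  | nil => rfl
  | cons a t ih => simp [List.foldl, ih, Function.iterate_succ_apply]

theorem pv_mul_add (s : List Char) (a b : Nat) :
    pyStrMulChars s (a + b) = pyStrMulChars s a ++ pyStrMulChars s b := by
  induction a with
  | zero => simp [pyStrMulChars]
  | succ a ih => simp [Nat.succ_add, pyStrMulChars, ih]

theorem pv_rev_rep (k : Nat) :
    (pyStrMulChars ['1', '0'] k).reverse = pyStrMulChars ['0', '1'] k := by
  induction k with
  | zero => rfl
  | succ k ih =>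
    show (['1', '0'] ++ pyStrMulChars ['1', '0'] k).reverse = _
    rw [List.reverse_append, ih]
    have : pyStrMulChars ['0', '1'] (k + 1) = pyStrMulChars ['0', '1'] k ++ pyStrMulChars ['0', '1'] 1 := by
      rw [← pv_mul_add]
    simpa [pyStrMulChars] using this.symm

theorem pv_flip_rep (k : Nat) :
    ((pyStrMulChars ['0', '1'] k).map (fun bit => flip_bit [bit])).flatten
      = pyStrMulChars ['1', '0'] k := by
  induction k with
  | zero => rfl
  | succ k ih =>
    show ((['0', '1'] ++ pyStrMulChars ['0', '1'] k).map _).flatten = _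
    rw [List.map_append, List.flatten_append, ih]
    rfl

theorem pv_step_rep (k : Nat) :
    pvStep (pyStrMulChars ['1', '0'] k) = pyStrMulChars ['1', '0'] (2 * k) := by
  unfold pvStep
  rw [pv_rev_rep, pv_flip_rep, ← pv_mul_add, Nat.two_mul]

theorem pv_iterate_step (m : Nat) :
    pvStep^[m + 1] ['1'] = pyStrMulChars ['1', '0'] (2 ^ m) := by
  induction m with
  | zero => rfl
  | succ m ih =>
    rw [Function.iterate_succ_apply', ih, pv_step_rep, ← pow_succ']

-- the port's loop body is (definitionally) pvStep
theorem pv_foldl_body (l : List Int) (init : List Char) :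
    l.foldl
      (fun string _ =>
        let reversed_string := string.reverse
        let complemented_string := (reversed_string.map (fun bit => flip_bit [bit])).flatten
        string ++ complemented_string)
      init = pvStep^[l.length] init := pv_foldl_const_step l init

-- ===== VERDICT (by name: the statement is the Claim_ definition above) =====
theorem build_string_spec : Claim_equal_build_string := by
  intro n _
  show build_string n = build_string_alt n
  unfold build_string build_string_alt
  rw [pv_foldl_body, PySem.List.length_pyRange_one]
  by_cases h : n < 2
  · have h0 : (n - 1 - 0).toNat = 0 := by omega
    rw [h0, if_pos h]
    rfl
  · have h1 : (n - 1 - 0).toNat = (n - 2).toNat + 1 := by omega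
    rw [h1, pv_iterate_step, if_neg h]
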